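-- pv_equiv track=rewrite | github.com/jkkummerfeld/irc-disentanglement | tools/tokenise.py | make_unk
-- ===== SOURCE A (Python) =====
-- import string
--
-- def make_unk(word):
--     has_digit = any(c in string.digits for c in word)
--     has_letter = any(c in string.ascii_letters for c in word)
--     marks = set()
--     for c in word:
--         if c in string.punctuation:
--             marks.add(c)
--     marks = list(marks)
--     marks.sort()
--     marks = ''.join(marks)
--
--     ans = "<unk"
--     if has_digit:
--         ans += "#"
--     if has_letter:
--         ans += "a"
--     ans += marks
--     ans += ">"
--     return ans
-- ===== SOURCE B (Python) =====
-- import string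
--
-- def make_unk(word):
--     # single pass: classify each char by its code, keep marks as a sorted
--     # duplicate-free list via ordered insertion
--     has_digit = False
--     has_letter = False
--     marks = []
--     for c in word:
--         o = ord(c)
--         if 48 <= o <= 57:
--             has_digit = True
--         elif 65 <= o <= 90 or 97 <= o <= 122:
--             has_letter = True
--         elif 33 <= o <= 126:
--             i = 0
--             while i < len(marks) and marks[i] < c:
--                 i += 1
--             if i == len(marks) or marks[i] != c:
--                 marks.insert(i, c)
--     out = "<unk"
--     if has_digit:
--         out += "#"
--     if has_letter:
--         out += "a"
--     return out + "".join(marks) + ">"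
-- ===== Notes on version B (the rewrite author's own statement) =====
-- stated objective: alternative
-- what changed: B makes a single pass over the word, classifying each character by arithmetic code-range tests instead of membership in the string constants, and maintains the marks as a sorted duplicate-free list via ordered insertion, replacing A's three separate scans plus set-list-sort pipeline.
import Mathlib
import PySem

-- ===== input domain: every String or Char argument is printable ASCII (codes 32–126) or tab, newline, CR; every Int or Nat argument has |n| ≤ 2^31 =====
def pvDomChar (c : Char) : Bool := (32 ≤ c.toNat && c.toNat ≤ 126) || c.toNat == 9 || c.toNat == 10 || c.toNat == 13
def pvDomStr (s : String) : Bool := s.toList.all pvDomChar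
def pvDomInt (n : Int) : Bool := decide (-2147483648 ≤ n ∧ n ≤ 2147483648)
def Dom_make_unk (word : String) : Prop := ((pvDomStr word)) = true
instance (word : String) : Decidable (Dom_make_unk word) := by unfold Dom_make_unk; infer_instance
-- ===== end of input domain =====

-- B is a single pass classifying each character by its code (range tests) and keeping the
-- marks as a sorted duplicate-free list via ordered insertion, instead of A's three scans
-- of the word plus a set that is listed and sorted afterwards (alternative decomposition).

-- module constants: string.digits, string.ascii_letters, string.punctuation
def pyDigits : List Char := "0123456789".toList
def pyAsciiLetters : List Char := "abcdefghijklmnopqrstuvwxyzABCDEFGHIJKLMNOPQRSTUVWXYZ".toList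
def pyPunctuation : List Char := "!\"#$%&'()*+,-./:;<=>?@[\\]^_`{|}~".toList

-- ===== PORT A =====
def make_unk (word : String) : String :=
  let has_digit := word.toList.any (fun c => pyDigits.contains c)
  let has_letter := word.toList.any (fun c => pyAsciiLetters.contains c)
  let marks : PySem.Set Char :=
    word.toList.foldl (fun s c => if pyPunctuation.contains c then PySem.Set.add s c else s)
      PySem.Set.empty
  let marksL := PySem.List.sorted marks (fun x => x) false
  let marksS := String.ofList marksL
  let ans := "<unk"
  let ans := if has_digit then ans ++ "#" else ans
  let ans := if has_letter then ans ++ "a" else ans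
  let ans := ans ++ marksS
  ans ++ ">"

-- ===== PORT B =====
-- the inner while/insert of Source B: ordered, duplicate-free insertion into the sorted list
def insMark (c : Char) : List Char → List Char
  | [] => [c]
  | x :: t => if x < c then x :: insMark c t
              else if x = c then x :: t
              else c :: x :: t

-- the loop body of Source B (one character: digit / letter / punctuation-by-code)
def unkStep (st : Bool × Bool × List Char) (c : Char) : Bool × Bool × List Char :=
  let o := c.toNat
  if 48 ≤ o ∧ o ≤ 57 then (true, st.2.1, st.2.2)
  else if (65 ≤ o ∧ o ≤ 90) ∨ (97 ≤ o ∧ o ≤ 122) then (st.1, true, st.2.2)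
  else if 33 ≤ o ∧ o ≤ 126 then (st.1, st.2.1, insMark c st.2.2)
  else st

def make_unk_alt (word : String) : String :=
  let st := word.toList.foldl unkStep (false, false, [])
  let out := "<unk"
  let out := if st.1 then out ++ "#" else out
  let out := if st.2.1 then out ++ "a" else out
  out ++ String.ofList st.2.2 ++ ">"

-- ===== PRECONDITION & SPEC =====
def Spec_make_unk (word : String) (out : String) : Prop := out = make_unk_alt word
instance (word : String) (out : String) : Decidable (Spec_make_unk word out) := by unfold Spec_make_unk; infer_instance

-- ===== CLAIM (what is proved, stated in full; the proofs are below) =====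
def Claim_equal_make_unk : Prop := ∀ (word : String), Dom_make_unk word → Spec_make_unk word (make_unk word)

-- ===== LEMMAS AND PROOFS =====

-- the three code-range tests of B, as Booleans
def digB (c : Char) : Bool := decide (48 ≤ c.toNat ∧ c.toNat ≤ 57)
def letB (c : Char) : Bool := decide ((65 ≤ c.toNat ∧ c.toNat ≤ 90) ∨ (97 ≤ c.toNat ∧ c.toNat ≤ 122))
def punB (c : Char) : Bool := !digB c && !letB c && decide (33 ≤ c.toNat ∧ c.toNat ≤ 126)

-- B's fold, decomposed into its three independent components
theorem foldB_eq (w : List Char) (d l : Bool) (m : List Char) :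
    w.foldl unkStep (d, l, m)
      = (d || w.any digB, l || w.any letB,
         w.foldl (fun m c => if punB c then insMark c m else m) m) := by
  induction w generalizing d l m with
  | nil => simp
  | cons c t ih =>
      by_cases hd : 48 ≤ c.toNat ∧ c.toNat ≤ 57
      · have h1 : digB c = true := by simp [digB, hd]
        have h2 : letB c = false := by simp [letB]; omega
        have h3 : punB c = false := by simp [punB, h1]
        have hs : unkStep (d, l, m) c = (true, l, m) := by simp [unkStep, hd]
        simp only [List.foldl_cons, List.any_cons, hs, ih, h1, h2, h3]
        simp
      · by_cases hl : (65 ≤ c.toNat ∧ c.toNat ≤ 90) ∨ (97 ≤ c.toNat ∧ c.toNat ≤ 122)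
        · have h1 : digB c = false := by simp [digB, hd]
          have h2 : letB c = true := by simp [letB, hl]
          have h3 : punB c = false := by simp [punB, h2]
          have hs : unkStep (d, l, m) c = (d, true, m) := by simp [unkStep, hd, hl]
          simp only [List.foldl_cons, List.any_cons, hs, ih, h1, h2, h3]
          simp
        · by_cases hp : 33 ≤ c.toNat ∧ c.toNat ≤ 126
          · have h1 : digB c = false := by simp [digB, hd]
            have h2 : letB c = false := by simp [letB, hl]
            have h3 : punB c = true := by simp [punB, h1, h2, hp]
            have hs : unkStep (d, l, m) c = (d, l, insMark c m) := by
              simp [unkStep, hd, hl, hp]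
            simp only [List.foldl_cons, List.any_cons, hs, ih, h1, h2, h3]
            simp
          · have h1 : digB c = false := by simp [digB, hd]
            have h2 : letB c = false := by simp [letB, hl]
            have h3 : punB c = false := by simp [punB, hp]
            have hs : unkStep (d, l, m) c = (d, l, m) := by simp [unkStep, hd, hl, hp]
            simp only [List.foldl_cons, List.any_cons, hs, ih, h1, h2, h3]
            simp

theorem mem_insMark (a c : Char) (m : List Char) :
    a ∈ insMark c m ↔ a = c ∨ a ∈ m := by
  induction m with
  | nil => simp [insMark]
  | cons x t ih =>
      simp only [insMark]
      split_ifs with h1 h2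
      · rw [List.mem_cons, ih, List.mem_cons]; tauto
      · subst h2; simp only [List.mem_cons]; tauto
      · simp only [List.mem_cons]

theorem pairwise_insMark (c : Char) (m : List Char) (h : m.Pairwise (· < ·)) :
    (insMark c m).Pairwise (· < ·) := by
  induction m with
  | nil => simp [insMark]
  | cons x t ih =>
      rw [List.pairwise_cons] at h
      simp only [insMark]
      split_ifs with h1 h2
      · refine List.pairwise_cons.2 ⟨?_, ih h.2⟩
        intro a ha
        rcases (mem_insMark a c t).1 ha with rfl | ha'
        · exact h1
        · exact h.1 a ha'
      · exact List.pairwise_cons.2 h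
      · have hcx : c < x := lt_of_le_of_ne (not_lt.1 h1) (fun e => h2 e.symm)
        refine List.pairwise_cons.2 ⟨?_, List.pairwise_cons.2 h⟩
        intro a ha
        rcases List.mem_cons.1 ha with rfl | ha'
        · exact hcx
        · exact lt_trans hcx (h.1 a ha')

theorem pairwise_marksFold (p : Char → Bool) (w m : List Char) (h : m.Pairwise (· < ·)) :
    (w.foldl (fun m c => if p c then insMark c m else m) m).Pairwise (· < ·) := by
  induction w generalizing m with
  | nil => exact h
  | cons c t ih =>
      simp only [List.foldl_cons]
      split_ifs with hc
      · exact ih _ (pairwise_insMark c m h)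
      · exact ih _ h

theorem mem_marksFold (p : Char → Bool) (a : Char) (w m : List Char) :
    a ∈ w.foldl (fun m c => if p c then insMark c m else m) m
      ↔ a ∈ m ∨ (a ∈ w ∧ p a = true) := by
  induction w generalizing m with
  | nil => simp
  | cons c t ih =>
      simp only [List.foldl_cons, List.mem_cons]
      split_ifs with hc
      · rw [ih, mem_insMark]; constructor
        · rintro ((rfl | h) | h)
          · exact Or.inr ⟨Or.inl rfl, hc⟩
          · exact Or.inl h
          · exact Or.inr ⟨Or.inr h.1, h.2⟩
        · rintro (h | ⟨(rfl | h), hp⟩)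
          · exact Or.inl (Or.inr h)
          · exact Or.inl (Or.inl rfl)
          · exact Or.inr ⟨h, hp⟩
      · rw [ih]; constructor
        · rintro (h | h)
          · exact Or.inl h
          · exact Or.inr ⟨Or.inr h.1, h.2⟩
        · rintro (h | ⟨(rfl | h), hp⟩)
          · exact Or.inl h
          · exact absurd hp (by simp [hc])
          · exact Or.inr ⟨h, hp⟩

-- per-character equivalence of A's membership tests and B's code-range tests (127 codes)
set_option maxRecDepth 4000 in
theorem code_tables : ∀ n, n ≤ 126 →
    pyDigits.contains (Char.ofNat n) = decide (48 ≤ n ∧ n ≤ 57)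
    ∧ pyAsciiLetters.contains (Char.ofNat n) = decide ((65 ≤ n ∧ n ≤ 90) ∨ (97 ≤ n ∧ n ≤ 122))
    ∧ pyPunctuation.contains (Char.ofNat n)
        = (!decide (48 ≤ n ∧ n ≤ 57) && !decide ((65 ≤ n ∧ n ≤ 90) ∨ (97 ≤ n ∧ n ≤ 122))
            && decide (33 ≤ n ∧ n ≤ 126)) := by decide

theorem dom_le (c : Char) (h : pvDomChar c = true) : c.toNat ≤ 126 := by
  simp only [pvDomChar, Bool.or_eq_true, Bool.and_eq_true, decide_eq_true_eq, beq_iff_eq] at h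
  omega

theorem dig_eq (c : Char) (h : pvDomChar c = true) : pyDigits.contains c = digB c := by
  have := (code_tables c.toNat (dom_le c h)).1
  rwa [Char.ofNat_toNat] at this

theorem let_eq (c : Char) (h : pvDomChar c = true) : pyAsciiLetters.contains c = letB c := by
  have := (code_tables c.toNat (dom_le c h)).2.1
  rwa [Char.ofNat_toNat] at this

theorem pun_eq (c : Char) (h : pvDomChar c = true) : pyPunctuation.contains c = punB c := by
  have := (code_tables c.toNat (dom_le c h)).2.2
  rwa [Char.ofNat_toNat] at this

-- A's add-if-punct fold is set(filter punct word)
theorem foldl_add_if (l : List Char) (s : PySem.Set Char) :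
    l.foldl (fun s c => if pyPunctuation.contains c then PySem.Set.add s c else s) s
      = (l.filter (fun c => pyPunctuation.contains c)).foldl PySem.Set.add s := by
  induction l generalizing s with
  | nil => rfl
  | cons c t ih =>
      by_cases h : pyPunctuation.contains c = true
      · simp only [List.foldl_cons, List.filter_cons, h, if_true]
        exact ih _
      · simp only [List.foldl_cons, List.filter_cons, if_neg h]
        exact ih _

-- A's sorted set of marks equals B's incrementally sorted list
theorem marks_eq (w : List Char) (hw : w.all pvDomChar = true) :
    PySem.List.sorted
      (w.foldl (fun s c => if pyPunctuation.contains c then PySem.Set.add s c else s)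
        PySem.Set.empty) (fun x => x) false
      = w.foldl (fun m c => if punB c then insMark c m else m) [] := by
  rw [foldl_add_if]
  have hA : (w.filter (fun c => pyPunctuation.contains c)).foldl PySem.Set.add PySem.Set.empty
      = PySem.Set.ofList (w.filter (fun c => pyPunctuation.contains c)) :=
    (PySem.Set.ofList_eq_foldl _).symm
  rw [hA]
  have hpair := pairwise_marksFold punB w [] (by simp)
  refine PySem.List.sorted_eq_of_perm_of_pairwise_lt _ _ (fun x : Char => x) ?_ ?_
  · rw [List.perm_ext_iff_of_nodup (hpair.imp ne_of_lt) (PySem.Set.nodup_ofList _)]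
    intro a
    rw [mem_marksFold, PySem.Set.mem_ofList, List.mem_filter]
    simp only [List.not_mem_nil, false_or]
    constructor
    · rintro ⟨ha, hp⟩
      exact ⟨ha, by rw [pun_eq a (List.all_eq_true.1 hw a ha)]; exact hp⟩
    · rintro ⟨ha, hp⟩
      exact ⟨ha, by rwa [← pun_eq a (List.all_eq_true.1 hw a ha)]⟩
  · exact hpair

theorem make_unk_eq (word : String) (h : Dom_make_unk word) :
    make_unk word = make_unk_alt word := by
  have hw : word.toList.all pvDomChar = true := h
  simp only [make_unk, make_unk_alt, foldB_eq, Bool.false_or]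
  rw [marks_eq word.toList hw,
    PySem.List.any_congr_mem (fun c hc => dig_eq c (List.all_eq_true.1 hw c hc)),
    PySem.List.any_congr_mem (fun c hc => let_eq c (List.all_eq_true.1 hw c hc))]

-- ===== VERDICT (by name: the statement is the Claim_ definition above) =====
theorem make_unk_spec : Claim_equal_make_unk := by
  intro word h
  exact make_unk_eq word h
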